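-- pv_equiv track=rewrite | github.com/nnzhaocs/scripts-for-alltest | scripts/spark-code/get_file_type.py | filter_non_ELF_executable_types
-- ===== SOURCE A (Python) =====
-- def filter_non_ELF_executable_types(words):
--     # words = re.split(' |; |, |\"|\" ', tstr)
--     lowcase_words = []
--     for word in words:
--         lowcase_words.append(word.lower())
--     if 'script' in lowcase_words:
--         return filter_script(lowcase_words)
--     else:
--         return filter_non_script(lowcase_words)
--
-- def filter_script(lowcase_word):
--     if 'python' in lowcase_word:
--         return "python-script"
--     elif 'bash' in lowcase_word:
--         return 'bash-shell-script'
--     elif 'shell' in lowcase_word: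
--         return 'bash-shell-script'
--     elif 'ruby' in lowcase_word:
--         return 'ruby-jruby-script'
--     elif 'jruby' in lowcase_word:
--         return 'ruby-jruby-script'
--     elif 'node' in lowcase_word:
--         return  'node-script'
--     elif 'perl' in lowcase_word:
--         return 'perl-script'
--     elif 'php' in lowcase_word:
--         return 'php-script'
--     else:
--         return 'other-script'
--
-- def filter_non_script(lowcase_word):
--     if 'pe32' in lowcase_word or 'pe32+' in lowcase_word:
--         return 'PE-PE32-execu'
--     elif 'vax'  in lowcase_word and 'coff' in lowcase_word:
--         return 'VAX-COFF-execu'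
--     else:
--         return 'other-nonELF-execu'
-- ===== SOURCE B (Python) =====
-- def filter_non_ELF_executable_types(words):
--     # Single pass: classify each lowered word once, tracking the minimum-priority
--     # script keyword seen (best) plus four presence flags; decide at the end.
--     rank = {'python': 0, 'bash': 1, 'shell': 2, 'ruby': 3, 'jruby': 4,
--             'node': 5, 'perl': 6, 'php': 7}
--     labels = ['python-script', 'bash-shell-script', 'bash-shell-script',
--               'ruby-jruby-script', 'ruby-jruby-script', 'node-script',
--               'perl-script', 'php-script', 'other-script']
--     best = 8
--     has_script = has_pe32 = has_vax = has_coff = False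
--     for word in words:
--         lw = word.lower()
--         if lw == 'script':
--             has_script = True
--         elif lw == 'pe32' or lw == 'pe32+':
--             has_pe32 = True
--         elif lw == 'vax':
--             has_vax = True
--         elif lw == 'coff':
--             has_coff = True
--         else:
--             r = rank.get(lw, 8)
--             if r < best:
--                 best = r
--     if has_script:
--         return labels[best]
--     if has_pe32:
--         return 'PE-PE32-execu'
--     if has_vax and has_coff:
--         return 'VAX-COFF-execu'
--     return 'other-nonELF-execu'
-- ===== Notes on version B (the rewrite author's own statement) =====
-- stated objective: alternative
-- what changed: B makes one pass over the words, classifying each lowered word as it goes into a minimum-priority accumulator (rank of the best script keyword seen) plus four presence flags, and decides the label at the end, instead of A's staged build-lowered-list then repeated membership scans through two elif-chain helpers.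
import Mathlib
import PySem

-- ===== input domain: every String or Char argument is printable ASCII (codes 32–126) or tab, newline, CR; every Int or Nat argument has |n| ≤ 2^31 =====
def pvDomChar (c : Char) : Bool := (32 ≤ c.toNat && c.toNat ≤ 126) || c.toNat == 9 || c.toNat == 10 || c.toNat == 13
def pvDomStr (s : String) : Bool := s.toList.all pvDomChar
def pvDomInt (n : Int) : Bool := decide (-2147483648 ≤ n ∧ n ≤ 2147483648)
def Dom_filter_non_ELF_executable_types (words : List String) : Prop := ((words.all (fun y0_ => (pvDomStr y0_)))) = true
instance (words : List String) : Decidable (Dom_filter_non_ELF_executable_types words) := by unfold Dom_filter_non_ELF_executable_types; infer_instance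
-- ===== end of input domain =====

-- B replaces A's lowered-list plus repeated membership chains by ONE pass that classifies each
-- word as it is lowered, keeping a minimum-priority accumulator and four presence flags; objective: alternative.

-- ===== PORT A =====
def pvFilterScript (lowcase_word : List String) : String :=
  if lowcase_word.contains "python" then "python-script"
  else if lowcase_word.contains "bash" then "bash-shell-script"
  else if lowcase_word.contains "shell" then "bash-shell-script"
  else if lowcase_word.contains "ruby" then "ruby-jruby-script"
  else if lowcase_word.contains "jruby" then "ruby-jruby-script"
  else if lowcase_word.contains "node" then "node-script"
  else if lowcase_word.contains "perl" then "perl-script"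
  else if lowcase_word.contains "php" then "php-script"
  else "other-script"

def pvFilterNonScript (lowcase_word : List String) : String :=
  if lowcase_word.contains "pe32" || lowcase_word.contains "pe32+" then "PE-PE32-execu"
  else if lowcase_word.contains "vax" && lowcase_word.contains "coff" then "VAX-COFF-execu"
  else "other-nonELF-execu"

def filter_non_ELF_executable_types (words : List String) : String :=
  let lowcase_words := words.foldl (fun acc word => acc ++ [PySem.Str.lower word]) []
  if lowcase_words.contains "script" then pvFilterScript lowcase_words
  else pvFilterNonScript lowcase_words

-- ===== PORT B =====
-- the dict literal `rank`
def pvRankDict : PySem.Dict String Nat :=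
  PySem.Dict.ofList [("python", 0), ("bash", 1), ("shell", 2), ("ruby", 3),
                     ("jruby", 4), ("node", 5), ("perl", 6), ("php", 7)]

-- the list literal `labels`
def pvLabels : List String :=
  ["python-script", "bash-shell-script", "bash-shell-script", "ruby-jruby-script",
   "ruby-jruby-script", "node-script", "perl-script", "php-script", "other-script"]

-- loop body: state = (best, has_script, has_pe32, has_vax, has_coff)
def pvStep (st : Nat × Bool × Bool × Bool × Bool) (word : String) :
    Nat × Bool × Bool × Bool × Bool :=
  let lw := PySem.Str.lower word
  if lw = "script" then (st.1, true, st.2.2.1, st.2.2.2.1, st.2.2.2.2)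
  else if lw = "pe32" || lw = "pe32+" then (st.1, st.2.1, true, st.2.2.2.1, st.2.2.2.2)
  else if lw = "vax" then (st.1, st.2.1, st.2.2.1, true, st.2.2.2.2)
  else if lw = "coff" then (st.1, st.2.1, st.2.2.1, st.2.2.2.1, true)
  else
    let r := PySem.Dict.getD pvRankDict lw 8
    (if r < st.1 then r else st.1, st.2.1, st.2.2.1, st.2.2.2.1, st.2.2.2.2)

def filter_non_ELF_executable_types_alt (words : List String) : String :=
  let st := words.foldl pvStep (8, false, false, false, false)
  if st.2.1 then pvLabels.getD st.1 "other-script"  -- exact for labels[best]: 0 ≤ best ≤ 8 < 9 throughout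
  else if st.2.2.1 then "PE-PE32-execu"
  else if st.2.2.2.1 && st.2.2.2.2 then "VAX-COFF-execu"
  else "other-nonELF-execu"

-- ===== PRECONDITION & SPEC =====
def Spec_filter_non_ELF_executable_types (words : List String) (out : String) : Prop := out = filter_non_ELF_executable_types_alt words
instance (words : List String) (out : String) : Decidable (Spec_filter_non_ELF_executable_types words out) := by unfold Spec_filter_non_ELF_executable_types; infer_instance

-- ===== CLAIM (what is proved, stated in full; the proofs are below) =====
def Claim_equal_filter_non_ELF_executable_types : Prop := ∀ (words : List String), Dom_filter_non_ELF_executable_types words → Spec_filter_non_ELF_executable_types words (filter_non_ELF_executable_types words)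

-- ===== LEMMAS AND PROOFS =====

-- rank of a single (already lowered) word
def pvRank (w : String) : Nat := PySem.Dict.getD pvRankDict w 8

theorem pvRank_def (w : String) : PySem.Dict.getD pvRankDict w 8 = pvRank w := rfl

theorem pvRankDict_eq : pvRankDict = PySem.Dict.mk
    [("python", 0), ("bash", 1), ("shell", 2), ("ruby", 3),
     ("jruby", 4), ("node", 5), ("perl", 6), ("php", 7)] := by decide

theorem pvRank_le (w : String) : pvRank w ≤ 8 := by
  unfold pvRank
  rw [pvRankDict_eq]
  simp only [PySem.Dict.getD_eq_get?_getD, PySem.Dict.get?_mk_cons]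
  split_ifs <;> simp [PySem.Dict.get?]

theorem pvRank_other (w : String) (h0 : w ≠ "python") (h1 : w ≠ "bash") (h2 : w ≠ "shell")
    (h3 : w ≠ "ruby") (h4 : w ≠ "jruby") (h5 : w ≠ "node") (h6 : w ≠ "perl")
    (h7 : w ≠ "php") : pvRank w = 8 := by
  unfold pvRank
  rw [pvRankDict_eq]
  simp [PySem.Dict.getD_eq_get?_getD, PySem.Dict.get?,
        Ne.symm h0, Ne.symm h1, Ne.symm h2, Ne.symm h3, Ne.symm h4, Ne.symm h5,
        Ne.symm h6, Ne.symm h7]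

-- min-rank of a lowered list, as the fold B runs
def pvMR (L : List String) : Nat := L.foldl (fun m w => min m (pvRank w)) 8

theorem pv_foldl_min_le (L : List String) (b : Nat) :
    L.foldl (fun m w => min m (pvRank w)) b ≤ b := by
  induction L generalizing b with
  | nil => simp
  | cons w t ih =>
      calc List.foldl (fun m w => min m (pvRank w)) (min b (pvRank w)) t
          ≤ min b (pvRank w) := ih _
        _ ≤ b := Nat.min_le_left _ _

theorem pvMR_le (L : List String) : pvMR L ≤ 8 := pv_foldl_min_le L 8

theorem pv_foldl_min_init (L : List String) (b : Nat) (hb : b ≤ 8) :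
    L.foldl (fun m w => min m (pvRank w)) b = min b (pvMR L) := by
  induction L generalizing b with
  | nil =>
      simp only [pvMR, List.foldl_nil]
      omega
  | cons w t ih =>
      have hr := pvRank_le w
      simp only [pvMR, List.foldl_cons]
      rw [ih _ (by omega), ih _ (by omega)]
      simp only [pvMR]
      omega

-- the one-pass fold computes: the min-rank fold, and the four membership flags
theorem pv_fold_char (ws : List String) (b : Nat) (s p v c : Bool) (hb : b ≤ 8) :
    ws.foldl pvStep (b, s, p, v, c) =
      ((ws.map PySem.Str.lower).foldl (fun m w => min m (pvRank w)) b,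
       s || (ws.map PySem.Str.lower).contains "script",
       p || ((ws.map PySem.Str.lower).contains "pe32" || (ws.map PySem.Str.lower).contains "pe32+"),
       v || (ws.map PySem.Str.lower).contains "vax",
       c || (ws.map PySem.Str.lower).contains "coff") := by
  induction ws generalizing b s p v c with
  | nil => simp
  | cons w t ih =>
      simp only [List.foldl_cons, List.map_cons, List.contains_cons, pvStep]
      have hb8 : min b 8 = b := by omega
      split_ifs with h1 h2 h3 h4 h5
      · rw [ih _ _ _ _ _ hb, h1, pv_foldl_min_init _ _ hb,
            pv_foldl_min_init _ _ (by omega : min b (pvRank "script") ≤ 8),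
            (by decide : pvRank "script" = 8), hb8]
        simp
      · simp only [decide_eq_true_eq, Bool.or_eq_true] at h2
        rcases h2 with h2 | h2
        · rw [ih _ _ _ _ _ hb, h2, pv_foldl_min_init _ _ hb,
              pv_foldl_min_init _ _ (by omega : min b (pvRank "pe32") ≤ 8),
              (by decide : pvRank "pe32" = 8), hb8]
          simp
        · rw [ih _ _ _ _ _ hb, h2, pv_foldl_min_init _ _ hb,
              pv_foldl_min_init _ _ (by omega : min b (pvRank "pe32+") ≤ 8),
              (by decide : pvRank "pe32+" = 8), hb8]
          simp
      · simp only [decide_eq_true_eq, Bool.or_eq_true, not_or] at h2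
        rw [ih _ _ _ _ _ hb, h3, pv_foldl_min_init _ _ hb,
            pv_foldl_min_init _ _ (by omega : min b (pvRank "vax") ≤ 8),
            (by decide : pvRank "vax" = 8), hb8]
        simp
      · simp only [decide_eq_true_eq, Bool.or_eq_true, not_or] at h2
        rw [ih _ _ _ _ _ hb, h4, pv_foldl_min_init _ _ hb,
            pv_foldl_min_init _ _ (by omega : min b (pvRank "coff") ≤ 8),
            (by decide : pvRank "coff" = 8), hb8]
        simp
      · -- rank update fired: pvRank lw < b
        simp only [decide_eq_true_eq, Bool.or_eq_true, not_or] at h2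
        rw [pvRank_def] at h5
        rw [pvRank_def, ih _ _ _ _ _ (pvRank_le _),
            pv_foldl_min_init _ _ (pvRank_le _), pv_foldl_min_init _ _ (by omega)]
        simp only [Prod.mk.injEq]
        refine ⟨by omega, ?_, ?_, ?_, ?_⟩ <;>
          simp [beq_eq_false_iff_ne.2 (Ne.symm h1), beq_eq_false_iff_ne.2 (Ne.symm h2.1),
                beq_eq_false_iff_ne.2 (Ne.symm h2.2), beq_eq_false_iff_ne.2 (Ne.symm h3),
                beq_eq_false_iff_ne.2 (Ne.symm h4)]
      · -- rank update did not fire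
        simp only [decide_eq_true_eq, Bool.or_eq_true, not_or] at h2
        rw [pvRank_def] at h5
        have hr := pvRank_le (PySem.Str.lower w)
        rw [ih _ _ _ _ _ hb, pv_foldl_min_init _ _ hb, pv_foldl_min_init _ _ (by omega)]
        simp only [Prod.mk.injEq]
        refine ⟨by omega, ?_, ?_, ?_, ?_⟩ <;>
          simp [beq_eq_false_iff_ne.2 (Ne.symm h1), beq_eq_false_iff_ne.2 (Ne.symm h2.1),
                beq_eq_false_iff_ne.2 (Ne.symm h2.2), beq_eq_false_iff_ne.2 (Ne.symm h3),
                beq_eq_false_iff_ne.2 (Ne.symm h4)]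

-- the priority chain over a lowered list equals the minimum rank
set_option maxHeartbeats 2000000 in
theorem pvMR_char (L : List String) :
    pvMR L =
      if L.contains "python" then 0 else if L.contains "bash" then 1
      else if L.contains "shell" then 2 else if L.contains "ruby" then 3
      else if L.contains "jruby" then 4 else if L.contains "node" then 5
      else if L.contains "perl" then 6 else if L.contains "php" then 7 else 8 := by
  induction L with
  | nil => simp [pvMR]
  | cons w t ih =>
      have hr := pvRank_le w
      have hle := pvMR_le t
      have hstep : pvMR (w :: t) = min (pvRank w) (pvMR t) := by
        simp only [pvMR, List.foldl_cons]
        rw [pv_foldl_min_init _ _ (by omega : min 8 (pvRank w) ≤ 8)]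
        simp only [pvMR]
        omega
      rw [hstep, ih]
      clear hstep ih hle
      simp only [List.contains_cons, beq_iff_eq, Bool.or_eq_true]
      by_cases e0 : w = "python"
      · subst e0
        have h : pvRank "python" = 0 := by decide
        simp [h]
      by_cases e1 : w = "bash"
      · subst e1
        have h : pvRank "bash" = 1 := by decide
        simp [h]
        all_goals split_ifs <;> omega
      by_cases e2 : w = "shell"
      · subst e2
        have h : pvRank "shell" = 2 := by decide
        simp [h]
        all_goals split_ifs <;> omega
      by_cases e3 : w = "ruby"
      · subst e3
        have h : pvRank "ruby" = 3 := by decide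
        simp [h]
        all_goals split_ifs <;> omega
      by_cases e4 : w = "jruby"
      · subst e4
        have h : pvRank "jruby" = 4 := by decide
        simp [h]
        all_goals split_ifs <;> omega
      by_cases e5 : w = "node"
      · subst e5
        have h : pvRank "node" = 5 := by decide
        simp [h]
        all_goals split_ifs <;> omega
      by_cases e6 : w = "perl"
      · subst e6
        have h : pvRank "perl" = 6 := by decide
        simp [h]
        all_goals split_ifs <;> omega
      by_cases e7 : w = "php"
      · subst e7
        have h : pvRank "php" = 7 := by decide
        simp [h]
        all_goals split_ifs <;> omega
      have h : pvRank w = 8 := pvRank_other w e0 e1 e2 e3 e4 e5 e6 e7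
      simp only [h, Ne.symm e0, Ne.symm e1, Ne.symm e2, Ne.symm e3, Ne.symm e4, Ne.symm e5, Ne.symm e6, Ne.symm e7, false_or]
      split_ifs <;> omega

-- the script elif-chain equals a label lookup at the minimum rank
theorem pv_script_label (L : List String) :
    pvFilterScript L = pvLabels.getD (pvMR L) "other-script" := by
  rw [pvMR_char]
  unfold pvFilterScript pvLabels
  split_ifs <;> rfl

-- ===== VERDICT =====
theorem filter_non_ELF_executable_types_spec : Claim_equal_filter_non_ELF_executable_types := by
  intro words _
  unfold Spec_filter_non_ELF_executable_types filter_non_ELF_executable_types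
    filter_non_ELF_executable_types_alt
  rw [PySem.List.foldl_append_singleton_eq_map]
  rw [pv_fold_char words 8 false false false false (by omega)]
  rw [pv_foldl_min_init _ _ (by omega)]
  have h8 : min 8 (pvMR (words.map PySem.Str.lower)) = pvMR (words.map PySem.Str.lower) := by
    have := pvMR_le (words.map PySem.Str.lower)
    omega
  simp only [List.nil_append, Bool.false_or, h8, ← pv_script_label]
  unfold pvFilterNonScript
  rfl
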